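-- pv_equiv track=rewrite | github.com/tilde-lab/tilde | core/common.py | html_formula
-- ===== SOURCE A (Python) =====
-- def html_formula(string):
--     sub, html_formula = False, ''
--     for n, i in enumerate(string):
--         if i.isdigit() or i=='.' or i=='-':
--             if not sub and n != 0:
--                 html_formula += '<sub>'
--                 sub = True
--         else:
--             if sub and i != 'd':
--                 html_formula += '</sub>'
--                 sub = False
--         html_formula += i
--     if sub: html_formula += '</sub>'
--     return html_formula
-- ===== SOURCE B (Python) =====
-- def html_formula(string):
--     # Run-based single pass: emit the first char as-is, then wrap each maximal
--     # subscript run (started by a digit/'.'/'-', continued by digit/'.'/'-'/'d').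
--     if not string:
--         return ''
--     out = [string[0]]
--     i, n = 1, len(string)
--     while i < n:
--         c = string[i]
--         if c.isdigit() or c in '.-':
--             j = i + 1
--             while j < n and (string[j].isdigit() or string[j] in '.-d'):
--                 j += 1
--             out.append('<sub>' + string[i:j] + '</sub>')
--             i = j
--         else:
--             out.append(c)
--             i += 1
--     return ''.join(out)
-- ===== Notes on version B (the rewrite author's own statement) =====
-- stated objective: alternative
-- what changed: A walks the string char by char maintaining a sub open/closed flag; B emits the first character verbatim and then wraps each maximal subscript run (a digit/'.'/'-' starter plus its digit/'.'/'-'/'d' continuation) in one step, with no flag state.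
import Mathlib
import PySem

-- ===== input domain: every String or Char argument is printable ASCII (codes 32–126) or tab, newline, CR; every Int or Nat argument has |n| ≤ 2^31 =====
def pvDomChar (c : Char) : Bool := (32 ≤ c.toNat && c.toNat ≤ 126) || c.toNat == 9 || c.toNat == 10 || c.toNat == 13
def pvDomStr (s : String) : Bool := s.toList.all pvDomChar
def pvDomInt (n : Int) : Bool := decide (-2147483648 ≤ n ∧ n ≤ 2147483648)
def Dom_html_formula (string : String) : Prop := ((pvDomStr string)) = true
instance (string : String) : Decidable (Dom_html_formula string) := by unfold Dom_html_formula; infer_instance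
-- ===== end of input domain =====

-- B replaces A's char-by-char loop with a sub-flag by a run-based pass that wraps each
-- maximal subscript run at once (objective: alternative decomposition, same cost).

-- shared character tests (Python: i.isdigit() or i=='.' or i=='-'; continuation also allows 'd')
def pvStart (c : Char) : Bool := PySem.Chars.isdigit c || c == '.' || c == '-'
def pvCont (c : Char) : Bool := PySem.Chars.isdigit c || c == '.' || c == '-' || c == 'd'

-- ===== PORT A =====
-- A's loop: state (sub, acc) over enumerate(string); '<sub>'/'</sub>' inserted as in the source.
def pvStepA (st : Bool × List Char) (p : Int × Char) : Bool × List Char :=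
  let sub := st.1; let acc := st.2; let n := p.1; let i := p.2
  if pvStart i then
    if !sub && decide (n ≠ 0) then (true, acc ++ "<sub>".toList ++ [i]) else (sub, acc ++ [i])
  else
    if sub && i != 'd' then (false, acc ++ "</sub>".toList ++ [i]) else (sub, acc ++ [i])

def html_formula (string : String) : String :=
  let r := (PySem.List.enumerate string.toList 0).foldl pvStepA (false, [])
  String.mk (if r.1 then r.2 ++ "</sub>".toList else r.2)

-- ===== PORT B =====
-- the while loop over `rest`: a run is the starter plus the maximal pvCont stretch after it
def pvAltGo : List Char → List Char
  | [] => []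
  | c :: rest =>
    if pvStart c then
      "<sub>".toList ++ (c :: rest.takeWhile pvCont) ++ "</sub>".toList
        ++ pvAltGo (rest.dropWhile pvCont)
    else
      c :: pvAltGo rest
termination_by cs => cs.length
decreasing_by
  · exact Nat.lt_succ_of_le (List.length_dropWhile_le _ _)
  · simp

def html_formula_alt (string : String) : String :=
  match string.toList with
  | [] => ""
  | c :: rest => String.mk (c :: pvAltGo rest)

-- ===== PRECONDITION & SPEC =====
def Spec_html_formula (string : String) (out : String) : Prop := out = html_formula_alt string
instance (string : String) (out : String) : Decidable (Spec_html_formula string out) := by unfold Spec_html_formula; infer_instance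

-- ===== CLAIM (what is proved, stated in full; the proofs are below) =====
def Claim_equal_html_formula : Prop := ∀ (string : String), Dom_html_formula string → Spec_html_formula string (html_formula string)

-- ===== LEMMAS AND PROOFS =====

def pvFinish (r : Bool × List Char) : List Char :=
  if r.1 then r.2 ++ "</sub>".toList else r.2

-- direct-recursion reading of A's loop from position n with flag sub, including the final close tag
def pvGoA : Int → Bool → List Char → List Char
  | _, sub, [] => if sub then "</sub>".toList else []
  | n, sub, c :: cs =>
    if pvStart c then
      if !sub && decide (n ≠ 0) then "<sub>".toList ++ c :: pvGoA (n+1) true cs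
      else c :: pvGoA (n+1) sub cs
    else
      if sub && c != 'd' then "</sub>".toList ++ c :: pvGoA (n+1) false cs
      else c :: pvGoA (n+1) sub cs

theorem pvFoldA_eq_goA (cs : List Char) : ∀ (n : Int) (sub : Bool) (acc : List Char),
    pvFinish ((PySem.List.enumerate cs n).foldl pvStepA (sub, acc)) = acc ++ pvGoA n sub cs := by
  induction cs with
  | nil => intro n sub acc; cases sub <;> simp [pvGoA, pvFinish, PySem.List.enumerate]
  | cons c cs ih =>
    intro n sub acc
    rw [PySem.List.enumerate_cons, List.foldl_cons]
    simp only [pvStepA]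
    split_ifs with h1 h2 h3
    · rw [ih]; simp only [pvGoA, if_pos h1, if_pos h2]; simp
    · rw [ih]; simp only [pvGoA, if_pos h1, if_neg h2]; simp
    · rw [ih]; simp only [pvGoA, if_neg h1, if_pos h3]; simp
    · rw [ih]; simp only [pvGoA, if_neg h1, if_neg h3]; simp

theorem pvGoA_congr (cs : List Char) : ∀ (n m : Int) (sub : Bool), 1 ≤ n → 1 ≤ m →
    pvGoA n sub cs = pvGoA m sub cs := by
  induction cs with
  | nil => intros; rfl
  | cons c cs ih =>
    intro n m sub hn hm
    have dn : decide (n ≠ 0) = true := by simp; omega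
    have dm : decide (m ≠ 0) = true := by simp; omega
    simp only [pvGoA, dn, dm]
    rw [ih (n+1) (m+1) true (by omega) (by omega),
        ih (n+1) (m+1) sub (by omega) (by omega),
        ih (n+1) (m+1) false (by omega) (by omega)]

-- key correspondence: from position 1 on, A's loop with sub=false is B's run pass,
-- and with sub=true it first copies the pvCont stretch, closes the tag, and continues as B.
theorem pvGoA_eq_altGo (cs : List Char) :
    (pvGoA 1 false cs = pvAltGo cs) ∧
    (pvGoA 1 true cs =
      cs.takeWhile pvCont ++ "</sub>".toList ++ pvAltGo (cs.dropWhile pvCont)) := by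
  induction cs with
  | nil => simp [pvGoA, pvAltGo]
  | cons c cs ih =>
    obtain ⟨ihF, ihT⟩ := ih
    have e2 : ∀ sub, pvGoA 2 sub cs = pvGoA 1 sub cs :=
      fun sub => pvGoA_congr cs 2 1 sub (by omega) (by omega)
    constructor
    · by_cases hs : pvStart c = true
      · simp only [pvGoA, hs, if_true, if_pos (show (!false && decide ((1:Int) ≠ 0)) = true by simp)]
        rw [show (1:Int)+1 = 2 from rfl, e2, ihT]
        have hc : pvCont c = true := by
          simp [pvCont, pvStart] at hs ⊢; tauto
        simp [pvAltGo, hs]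
      · have hs' : pvStart c = false := by simpa using hs
        simp [pvGoA, hs', e2, ihF, pvAltGo]
    · by_cases hc : pvCont c = true
      · by_cases hs : pvStart c = true
        · simp only [pvGoA, hs, if_true,
            if_neg (show ¬ (!true && decide ((1:Int) ≠ 0)) = true by simp)]
          rw [show (1:Int)+1 = 2 from rfl, e2, ihT]
          simp [hc]
        · -- c = 'd' (continues a run but does not start one): stays subscripted, no close tag
          have hd : c = 'd' := by
            simp [pvCont, pvStart] at hc hs
            rcases hc with ((h|h)|h)|h <;> simp_all
          have hs' : pvStart c = false := by simpa using hs
          subst hd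
          simp [pvGoA, hs', e2, ihT, show pvCont 'd' = true from by decide]
      · have hs : pvStart c = false := by
          simp [pvCont, pvStart] at hc ⊢; tauto
        have hd : (c != 'd') = true := by
          simp [pvCont] at hc; simp; tauto
        simp [pvGoA, hs, hd, e2, ihF, hc, pvAltGo]

-- position 0 never opens a subscript, whatever the first character is
theorem pvGoA_zero_eq (cs : List Char) (c : Char) :
    pvGoA 0 false (c :: cs) = c :: pvAltGo cs := by
  have e1 : pvGoA 1 false cs = pvAltGo cs := (pvGoA_eq_altGo cs).1
  by_cases hs : pvStart c = true <;>
    simp [pvGoA, hs, e1]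

-- ===== VERDICT (by name: the statement is the Claim_ definition above) =====
theorem html_formula_spec : Claim_equal_html_formula := by
  intro s _
  unfold Spec_html_formula html_formula html_formula_alt
  have h := pvFoldA_eq_goA s.toList 0 false []
  cases hs : s.toList with
  | nil => decide
  | cons c cs =>
    rw [hs] at h
    show String.mk (pvFinish ((PySem.List.enumerate (c :: cs) 0).foldl pvStepA (false, []))) = _
    rw [h, pvGoA_zero_eq]
    simp
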